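-- pv_equiv track=rewrite | github.com/a-gavriel/Python-Games | Clases/Clases-Ejecicios/Soluciones/E4a.py | hay_par
-- ===== SOURCE A (Python) =====
-- def hay_par(num):
-- 	if num == 0:
-- 		return False
-- 	else:
-- 		dig = num%10
-- 		if dig%2 == 0:
-- 			return True
-- 		else:
-- 			return hay_par(num//10)
-- ===== SOURCE B (Python) =====
-- def hay_par(num):
--     num = abs(num)
--     while num != 0:
--         if num % 2 == 0:   # last decimal digit is even iff the number is even
--             return True
--         num //= 10
--     return False
-- ===== Notes on version B (the rewrite author's own statement) =====
-- stated objective: simpler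
-- what changed: Recursion replaced by an iterative digit-stripping loop over abs(num) that tests the number's own parity instead of extracting the digit with %10, so it checks the true decimal digits also for negative inputs.
-- intended difference: On negative inputs all of whose decimal digits are odd (e.g. -13) A returns True, an artefact of Python's floor %10 on negatives, while B returns False, which is intended because such numbers contain no even digit. — e.g. on hay_par(-13): A returns true, B returns false
import Mathlib
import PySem

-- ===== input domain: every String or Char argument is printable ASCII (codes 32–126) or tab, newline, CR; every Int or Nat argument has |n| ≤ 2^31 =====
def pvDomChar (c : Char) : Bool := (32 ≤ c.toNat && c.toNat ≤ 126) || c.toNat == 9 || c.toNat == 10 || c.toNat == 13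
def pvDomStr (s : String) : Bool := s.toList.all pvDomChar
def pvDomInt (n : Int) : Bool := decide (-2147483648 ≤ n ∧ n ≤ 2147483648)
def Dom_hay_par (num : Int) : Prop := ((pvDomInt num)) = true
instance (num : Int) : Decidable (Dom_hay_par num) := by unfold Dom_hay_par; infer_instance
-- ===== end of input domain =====

-- B replaces A's recursion by an iterative digit loop over abs(num) that tests the number's
-- own parity, so negative inputs are judged by their true decimal digits.

-- ===== PORT A =====
-- A's recursion diverges (Python RecursionError) on some negative inputs, so the port carries
-- fuel; fuel 100 is enough for every |num| ≤ 2^31, and fuel-exhaustion is only reachable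
-- outside Pre_hay_par.
def hay_parFuel : Nat → Int → Bool
  | 0, _ => false
  | f+1, num =>
    if num = 0 then false
    else
      let dig := PySem.Int.mod num 10
      if PySem.Int.mod dig 2 = 0 then true
      else hay_parFuel f (PySem.Int.floordiv num 10)

def hay_par (num : Int) : Bool := hay_parFuel 100 num

-- ===== PORT B =====
-- B's while loop: strip digits from abs(num); the last decimal digit is even iff the number is.
def hasEvenDigit : Nat → Bool
  | 0 => false
  | m+1 => if (m+1) % 2 = 0 then true else hasEvenDigit ((m+1)/10)
  decreasing_by exact Nat.div_lt_self (Nat.succ_pos m) (by norm_num)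

def hay_par_alt (num : Int) : Bool := hasEvenDigit num.natAbs

-- ===== PRECONDITION & SPEC =====
-- For m ≥ 1 the k-th value of A's chain m, ⌈m/10⌉, ⌈⌈m/10⌉/10⌉, … is ⌈m/10^k⌉ = (m-1)/10^k + 1;
-- it is odd iff (m-1)/10^k is even, and the chain is constant 1 once 10^k > m, so 32 indices
-- cover every |num| ≤ 2^31.  chainAllOdd m = every chain value is odd.
def chainAllOdd (m : Nat) : Bool := (List.range 32).all (fun k => ((m - 1) / 10^k) % 2 == 0)

-- Pre_ excludes exactly the negative inputs on which the Python A recurses forever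
-- (RecursionError): those whose whole ceil-by-10 chain is odd.
def Pre_hay_par (num : Int) : Prop := ¬ (num < 0 ∧ chainAllOdd num.natAbs = true)
instance (num : Int) : Decidable (Pre_hay_par num) := by unfold Pre_hay_par; infer_instance

def pvWitness_hay_par : Int := (10)

-- On negative inputs all of whose decimal digits are odd (e.g. -13) A returns True, an artefact
-- of Python's floor %10 on negatives, while B returns False, the intended answer since such
-- numbers contain no even digit.
def D_hay_par (num : Int) : Prop :=
  num < 0 ∧ (Nat.digits 10 num.natAbs).all (fun d => d % 2 == 1) = true
instance (num : Int) : Decidable (D_hay_par num) := by unfold D_hay_par; infer_instance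

def Spec_hay_par (num : Int) (out : Bool) : Prop := ¬ D_hay_par num → out = hay_par_alt num
instance (num : Int) (out : Bool) : Decidable (Spec_hay_par num out) := by unfold Spec_hay_par; infer_instance

def pvDiffWitness_hay_par : Int := (-13)
def pvDiffWitnessOut_hay_par : Bool × Bool := (true, false)

-- ===== CLAIM (what is proved, stated in full; the proofs are below) =====
def Claim_unchanged_hay_par : Prop := ∀ (num : Int), Dom_hay_par num → Pre_hay_par num → Spec_hay_par num (hay_par num)
def Claim_changed_hay_par : Prop := Dom_hay_par (pvDiffWitness_hay_par) ∧ Pre_hay_par (pvDiffWitness_hay_par) ∧ D_hay_par (pvDiffWitness_hay_par) ∧ hay_par (pvDiffWitness_hay_par) = pvDiffWitnessOut_hay_par.1 ∧ hay_par_alt (pvDiffWitness_hay_par) = pvDiffWitnessOut_hay_par.2 ∧ pvDiffWitnessOut_hay_par.1 ≠ pvDiffWitnessOut_hay_par.2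
def Claim_exact_hay_par : Prop := ∀ (num : Int), Dom_hay_par num → Pre_hay_par num → D_hay_par num → hay_par num ≠ hay_par_alt num

-- ===== LEMMAS AND PROOFS =====

-- On nonnegative inputs A's fuelled recursion computes B's digit test.
theorem fuel_nonneg (f : Nat) : ∀ m : Nat, m < 2^f → hay_parFuel f (m : Int) = hasEvenDigit m := by
  induction f with
  | zero =>
    intro m hm
    interval_cases m
    simp [hay_parFuel, hasEvenDigit]
  | succ f ih =>
    intro m hm
    match m with
    | 0 => simp [hay_parFuel, hasEvenDigit]
    | k+1 =>
      rw [hay_parFuel, hasEvenDigit]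
      have h0 : ((k+1 : Nat) : Int) ≠ 0 := by positivity
      rw [if_neg h0]
      have hdig : PySem.Int.mod ((k+1 : Nat) : Int) 10 = (((k+1) % 10 : Nat) : Int) := by
        exact_mod_cast PySem.Int.mod_natCast (k+1) 10
      have hdig2 : PySem.Int.mod (((k+1) % 10 : Nat) : Int) 2 = ((((k+1) % 10) % 2 : Nat) : Int) := by
        exact_mod_cast PySem.Int.mod_natCast ((k+1) % 10) 2
      have hpar : ((k+1) % 10) % 2 = (k+1) % 2 := by omega
      simp only [hdig, hdig2, hpar]
      by_cases he : (k+1) % 2 = 0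
      · rw [if_pos (by exact_mod_cast congrArg (Nat.cast : Nat → Int) he), if_pos he]
      · rw [if_neg (by exact_mod_cast fun h => he (by exact_mod_cast h)), if_neg he]
        have hfd : PySem.Int.floordiv ((k+1 : Nat) : Int) 10 = (((k+1) / 10 : Nat) : Int) := by
          exact_mod_cast PySem.Int.floordiv_natCast (k+1) 10
        rw [hfd]
        apply ih
        have hc : 1 ≤ 2^f := Nat.one_le_two_pow
        have : 2^(f+1) = 2 * 2^f := by ring
        omega

-- On negative inputs whose ceil-by-10 chain has an even value, A returns true.
theorem fuel_neg (f : Nat) : ∀ m : Nat, 0 < m → m < 2^f → chainAllOdd m = false →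
    hay_parFuel f (-(m : Int)) = true := by
  induction f with
  | zero => intro m hm hlt; omega
  | succ f ih =>
    intro m hm hlt hchain
    rw [hay_parFuel]
    have h0 : (-(m : Int)) ≠ 0 := by omega
    rw [if_neg h0]
    have hdig : PySem.Int.mod (-(m : Int)) 10 = (-(m : Int)) % 10 :=
      PySem.Int.mod_eq_emod_of_pos (by norm_num)
    have hdig2 : ∀ a : Int, PySem.Int.mod a 2 = a % 2 := fun a =>
      PySem.Int.mod_eq_emod_of_pos (by norm_num)
    simp only [hdig, hdig2]
    -- extract a chain index with an even value
    obtain ⟨k, hk32, hk⟩ : ∃ k, k < 32 ∧ ((m - 1) / 10^k) % 2 = 1 := by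
      unfold chainAllOdd at hchain
      rw [List.all_eq_false] at hchain
      obtain ⟨k, hkmem, hkval⟩ := hchain
      simp only [beq_iff_eq] at hkval
      exact ⟨k, List.mem_range.mp hkmem, by omega⟩
    by_cases he : m % 2 = 0
    · rw [if_pos (by omega)]
    · -- m odd, so k ≠ 0; recurse on the next chain value ⌈m/10⌉ = (m+9)/10
      match k with
      | 0 => omega
      | j+1 =>
        rw [if_neg (by omega)]
        have hfd : PySem.Int.floordiv (-((m : Nat) : Int)) 10 = -(((m+9)/10 : Nat) : Int) := by
          rw [PySem.Int.floordiv_eq_ediv_of_pos (by norm_num)]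
          omega
        rw [hfd]
        -- m - 1 ≥ 10^(j+1) since its quotient by 10^(j+1) is odd, hence ≥ 1
        have hpow : (10:Nat) ≤ 10^(j+1) := Nat.le_self_pow (by omega) 10
        have hbig : 10^(j+1) ≤ m - 1 := by
          rcases Nat.lt_or_ge (m-1) (10^(j+1)) with h | h
          · rw [Nat.div_eq_of_lt h] at hk; omega
          · exact h
        apply ih
        · omega
        · have hc : 1 ≤ 2^f := Nat.one_le_two_pow
          have : 2^(f+1) = 2 * 2^f := by ring
          omega
        · -- the next chain value's formula at index j is the old one at index j+1
          unfold chainAllOdd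
          rw [List.all_eq_false]
          refine ⟨j, List.mem_range.mpr (by omega), ?_⟩
          have hshift : ((m+9)/10 - 1) / 10^j = (m - 1) / 10^(j+1) := by
            have h1 : (m+9)/10 - 1 = (m-1)/10 := by omega
            rw [h1, Nat.div_div_eq_div_mul, ← pow_succ']
          simp only [hshift]
          simp only [beq_iff_eq]
          omega

-- B's loop finds an even digit iff not all decimal digits are odd.
theorem hasEven_not_allOdd : ∀ m : Nat,
    hasEvenDigit m = !((Nat.digits 10 m).all (fun d => d % 2 == 1)) := by
  intro m
  induction m using Nat.strong_induction_on with
  | _ m ih =>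
    match m with
    | 0 => simp [hasEvenDigit]
    | k+1 =>
      rw [hasEvenDigit, Nat.digits_def' (by norm_num : 1 < 10) (Nat.succ_pos k), List.all_cons]
      have hpar : (k+1) % 10 % 2 = (k+1) % 2 := by omega
      by_cases he : (k+1) % 2 = 0
      · rw [if_pos he]
        simp [hpar, he]
      · rw [if_neg he]
        rw [ih _ (Nat.div_lt_self (Nat.succ_pos k) (by norm_num))]
        have h1 : ((k+1) % 10 % 2 == 1) = true := by rw [hpar]; simp; omega
        rw [h1]
        simp

theorem natAbs_lt_fuel (num : Int) (h : Dom_hay_par num) : num.natAbs < 2^100 := by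
  have h1 : num.natAbs ≤ 2^31 := by
    unfold Dom_hay_par pvDomInt at h
    simp only [decide_eq_true_eq] at h
    omega
  exact lt_of_le_of_lt h1 (Nat.pow_lt_pow_right (by norm_num) (by norm_num))

-- ===== VERDICT (by name: the statement is the Claim_ definition above) =====
theorem hay_par_spec : Claim_unchanged_hay_par := by
  intro num hdom hpre hnd
  have hlt := natAbs_lt_fuel num hdom
  by_cases hneg : num < 0
  · have hoc : chainAllOdd num.natAbs = false := by
      unfold Pre_hay_par at hpre
      by_cases h : chainAllOdd num.natAbs = true
      · exact absurd ⟨hneg, h⟩ hpre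
      · simpa using h
    have hda : (Nat.digits 10 num.natAbs).all (fun d => d % 2 == 1) = false := by
      unfold D_hay_par at hnd
      by_cases h : (Nat.digits 10 num.natAbs).all (fun d => d % 2 == 1) = true
      · exact absurd ⟨hneg, h⟩ hnd
      · simpa using h
    have hcast : -((num.natAbs : Nat) : Int) = num := by omega
    have hm : 0 < num.natAbs := by omega
    unfold hay_par hay_par_alt
    rw [← hcast, fuel_neg 100 num.natAbs hm hlt hoc, hasEven_not_allOdd]
    rw [show ((-((num.natAbs : Nat) : Int)).natAbs) = num.natAbs by omega, hda]
    rfl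
  · have hcast : ((num.natAbs : Nat) : Int) = num := Int.natAbs_of_nonneg (by omega)
    unfold hay_par hay_par_alt
    rw [← hcast]
    exact fuel_nonneg 100 num.natAbs hlt

theorem hay_par_changed : Claim_changed_hay_par := by
  unfold Claim_changed_hay_par
  refine ⟨by decide, by decide, by decide, by decide, ?_, by decide⟩
  norm_num [pvDiffWitness_hay_par, pvDiffWitnessOut_hay_par, hay_par_alt, hasEvenDigit]

theorem hay_par_tight : Claim_exact_hay_par := by
  intro num hdom hpre hd
  obtain ⟨hneg, hda⟩ := hd
  have hoc : chainAllOdd num.natAbs = false := by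
    unfold Pre_hay_par at hpre
    by_cases h : chainAllOdd num.natAbs = true
    · exact absurd ⟨hneg, h⟩ hpre
    · simpa using h
  have hlt := natAbs_lt_fuel num hdom
  have hcast : -((num.natAbs : Nat) : Int) = num := by omega
  have hm : 0 < num.natAbs := by omega
  unfold hay_par hay_par_alt
  rw [← hcast, fuel_neg 100 num.natAbs hm hlt hoc, hasEven_not_allOdd]
  rw [show (-((num.natAbs : Nat) : Int)).natAbs = num.natAbs by omega, hda]
  decide
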